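-- pv_equiv track=rewrite | github.com/SqueezeStudioAnimation/tk-motionbuilder | hooks/tk-multi-publish2/basic/render_upload_take_version.py | _cams_settings_requires_multi_edit_mode
-- ===== SOURCE A (Python) =====
-- def _cams_settings_requires_multi_edit_mode(tasks_settings, cam_name):
--     """
--     Check if all the different tasks setting have a specific camera name value in there settings. If it's found,
--     compare there value.
--
--     :param tasks_settings: The different task settings to compare
--     :param cam_name: The specific name of the same to check
--     :return: True if the cam name setting is not the same on each setting or it exists on a setting and not on
--              others one. Else, return False
--     """
--
--     cam_exists_setting = []
--     for settings in tasks_settings: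
--         if cam_name in settings["cams"]:
--             cam_exists_setting.append(settings)
--
--     # In case all cam name setting don't exist, return False since all param are equal
--     if not cam_exists_setting:
--         return False
--
--     # If not all settings have the cam param set, check if the existing one are all false
--     if len(tasks_settings) != len(cam_exists_setting):
--         for setting in cam_exists_setting:
--             if setting["cams"][cam_name]:
--                 return True
--         # No return have been done, everything is false, so all settings will be equal
--         return False
--
--     # Finally, if all cam name setting exist, compare there value to know if we need multi-edit mode
--     return all(
--         tasks_settings[0]["cams"][cam_name] == task_setting["cams"][cam_name]
--         for task_setting in tasks_settings
--     ) is False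
-- ===== SOURCE B (Python) =====
-- def _cams_settings_requires_multi_edit_mode(tasks_settings, cam_name):
--     """Single pass with accumulators instead of a filter pass plus per-branch re-scans."""
--     total = 0
--     present = 0
--     any_truthy = False
--     first_val = None
--     all_equal = True
--     for settings in tasks_settings:
--         total += 1
--         cams = settings["cams"]
--         if cam_name in cams:
--             v = cams[cam_name]
--             if present == 0:
--                 first_val = v
--             elif v != first_val:
--                 all_equal = False
--             present += 1
--             if v:
--                 any_truthy = True
--     if present == 0:
--         return False
--     if present != total:
--         return any_truthy
--     return not all_equal
-- ===== Notes on version B (the rewrite author's own statement) =====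
-- stated objective: alternative
-- what changed: Replaced A's filter pass plus per-branch re-scans (a membership filter building cam_exists_setting, then either a truthiness scan of it or an all-equal generator over tasks_settings) by a single loop maintaining accumulators (total, present count, any-truthy flag, first present value, all-equal flag) followed by a three-way decision.
import Mathlib
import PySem

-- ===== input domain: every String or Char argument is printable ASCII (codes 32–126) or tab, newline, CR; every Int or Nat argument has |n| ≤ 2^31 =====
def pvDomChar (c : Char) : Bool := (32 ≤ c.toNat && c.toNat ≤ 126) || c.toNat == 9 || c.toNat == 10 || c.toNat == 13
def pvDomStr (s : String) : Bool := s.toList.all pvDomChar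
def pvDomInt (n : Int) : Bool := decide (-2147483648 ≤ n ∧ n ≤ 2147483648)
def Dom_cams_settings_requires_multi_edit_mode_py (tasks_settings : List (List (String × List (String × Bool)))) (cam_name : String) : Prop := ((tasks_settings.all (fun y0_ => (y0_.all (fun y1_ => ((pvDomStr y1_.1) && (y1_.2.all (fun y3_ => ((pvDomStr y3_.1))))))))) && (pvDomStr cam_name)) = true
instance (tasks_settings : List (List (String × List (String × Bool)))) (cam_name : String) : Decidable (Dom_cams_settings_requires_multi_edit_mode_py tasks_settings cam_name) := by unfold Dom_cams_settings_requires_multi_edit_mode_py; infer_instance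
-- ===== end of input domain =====

-- B replaces A's filter pass plus per-branch re-scans by one accumulator loop (same cost; objective: alternative decomposition).

-- ===== PORT A =====
-- settings["cams"] : the "cams" entry of a settings dict (KeyError when absent is excluded by Pre_; [] default unreachable inside Pre_)
def pvCamsOf (s : List (String × List (String × Bool))) : List (String × Bool) :=
  PySem.Dict.getD (PySem.Dict.mk s) "cams" []

-- cam_name in settings["cams"]
def pvHasCam (s : List (String × List (String × Bool))) (cam : String) : Bool :=
  PySem.Dict.contains (PySem.Dict.mk (pvCamsOf s)) cam

-- settings["cams"][cam_name] (only evaluated by A after the membership test, so the false default is unreachable)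
def pvCamVal (s : List (String × List (String × Bool))) (cam : String) : Bool :=
  PySem.Dict.getD (PySem.Dict.mk (pvCamsOf s)) cam false

def cams_settings_requires_multi_edit_mode_py (tasks_settings : List (List (String × List (String × Bool)))) (cam_name : String) : Bool :=
  -- cam_exists_setting = []; for settings in tasks_settings: if cam_name in settings["cams"]: append
  let cam_exists_setting :=
    tasks_settings.foldl (fun acc settings => if pvHasCam settings cam_name then acc ++ [settings] else acc) []
  if cam_exists_setting.isEmpty then false
  else if tasks_settings.length ≠ cam_exists_setting.length then
    -- early-return loop: return True at the first truthy value, else False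
    cam_exists_setting.any (fun setting => pvCamVal setting cam_name)
  else
    -- all(tasks_settings[0]["cams"][cam_name] == task_setting["cams"][cam_name] for ...) is False
    !(tasks_settings.all (fun task_setting =>
        pvCamVal ((PySem.List.pyGet? tasks_settings 0).getD []) cam_name == pvCamVal task_setting cam_name))

-- ===== PORT B =====
-- one step of B's loop over the state (total, present, any_truthy, first_val, all_equal)
def pvAltStep (cam : String) (st : Nat × Nat × Bool × Option Bool × Bool)
    (settings : List (String × List (String × Bool))) : Nat × Nat × Bool × Option Bool × Bool :=
  let (total, present, any_truthy, first_val, all_equal) := st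
  let total := total + 1
  let cams := PySem.Dict.mk (pvCamsOf settings)
  match PySem.Dict.get? cams cam with
  | none => (total, present, any_truthy, first_val, all_equal)
  | some v =>
      let first_val' := if present = 0 then some v else first_val
      let all_equal' := if present = 0 then all_equal else if some v ≠ first_val then false else all_equal
      (total, present + 1, any_truthy || v, first_val', all_equal')

def cams_settings_requires_multi_edit_mode_py_alt (tasks_settings : List (List (String × List (String × Bool)))) (cam_name : String) : Bool :=
  let st := tasks_settings.foldl (pvAltStep cam_name) (0, 0, false, none, true)
  let (total, present, any_truthy, _, all_equal) := st
  if present = 0 then false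
  else if present ≠ total then any_truthy
  else !all_equal

-- ===== PRECONDITION & SPEC =====
-- Pre_: every settings dict must have a "cams" key; where one is missing, Python A raises KeyError at settings["cams"].
def Pre_cams_settings_requires_multi_edit_mode_py (tasks_settings : List (List (String × List (String × Bool)))) (cam_name : String) : Prop :=
  ∀ s ∈ tasks_settings, PySem.Dict.contains (PySem.Dict.mk s) "cams" = true

instance (tasks_settings : List (List (String × List (String × Bool)))) (cam_name : String) : Decidable (Pre_cams_settings_requires_multi_edit_mode_py tasks_settings cam_name) := by unfold Pre_cams_settings_requires_multi_edit_mode_py; infer_instance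

def pvWitness_cams_settings_requires_multi_edit_mode_py : (List (List (String × List (String × Bool)))) × String :=
  ([[("cams", [("c", true)])], [("cams", [])]], "c")

def Spec_cams_settings_requires_multi_edit_mode_py (tasks_settings : List (List (String × List (String × Bool)))) (cam_name : String) (out : Bool) : Prop := out = cams_settings_requires_multi_edit_mode_py_alt tasks_settings cam_name
instance (tasks_settings : List (List (String × List (String × Bool)))) (cam_name : String) (out : Bool) : Decidable (Spec_cams_settings_requires_multi_edit_mode_py tasks_settings cam_name out) := by unfold Spec_cams_settings_requires_multi_edit_mode_py; infer_instance

-- ===== CLAIM (what is proved, stated in full; the proofs are below) =====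
def Claim_equal_cams_settings_requires_multi_edit_mode_py : Prop := ∀ (tasks_settings : List (List (String × List (String × Bool)))) (cam_name : String), Dom_cams_settings_requires_multi_edit_mode_py tasks_settings cam_name → Pre_cams_settings_requires_multi_edit_mode_py tasks_settings cam_name → Spec_cams_settings_requires_multi_edit_mode_py tasks_settings cam_name (cams_settings_requires_multi_edit_mode_py tasks_settings cam_name)

-- ===== LEMMAS AND PROOFS =====

-- the present values, in order
def pvVals (ts : List (List (String × List (String × Bool)))) (cam : String) : List Bool :=
  ts.filterMap (fun s => PySem.Dict.get? (PySem.Dict.mk (pvCamsOf s)) cam)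

-- "all other values equal the first"
def pvTailAllEq : List Bool → Bool
  | [] => true
  | v :: r => r.all (· == v)

theorem pvHasCam_iff_isSome (s : List (String × List (String × Bool))) (cam : String) :
    pvHasCam s cam = (PySem.Dict.get? (PySem.Dict.mk (pvCamsOf s)) cam).isSome := by
  simp [pvHasCam, PySem.Dict.contains_eq_isSome_get?]

theorem pvVals_eq_map_filter (ts : List (List (String × List (String × Bool)))) (cam : String) :
    pvVals ts cam = (ts.filter (fun s => pvHasCam s cam)).map (fun s => pvCamVal s cam) := by
  induction ts with
  | nil => rfl
  | cons s rest ih =>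
      simp only [pvVals, List.filterMap_cons, List.filter_cons]
      rw [pvHasCam_iff_isSome]
      cases h : PySem.Dict.get? (PySem.Dict.mk (pvCamsOf s)) cam with
      | none => simpa [pvVals] using ih
      | some v =>
          simp only [Option.isSome_some, if_pos, List.map_cons]
          rw [show pvCamVal s cam = v from by simp [pvCamVal, PySem.Dict.getD_eq_get?_getD, h]]
          exact congrArg (List.cons v) ih

-- B's loop invariant: running the fold from the state of a processed value-list vs
theorem pvAltStep_fold (cam : String) (l : List (List (String × List (String × Bool))))
    (n : Nat) (vs : List Bool) :
    l.foldl (pvAltStep cam) (n, vs.length, vs.any id, vs.head?, pvTailAllEq vs)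
      = (n + l.length, (vs ++ pvVals l cam).length, (vs ++ pvVals l cam).any id,
         (vs ++ pvVals l cam).head?, pvTailAllEq (vs ++ pvVals l cam)) := by
  induction l generalizing n vs with
  | nil => simp [pvVals]
  | cons s rest ih =>
      simp only [List.foldl_cons]
      have hstep : pvAltStep cam (n, vs.length, vs.any id, vs.head?, pvTailAllEq vs) s
          = match PySem.Dict.get? (PySem.Dict.mk (pvCamsOf s)) cam with
            | none => (n + 1, vs.length, vs.any id, vs.head?, pvTailAllEq vs)
            | some v => (n + 1, (vs ++ [v]).length, (vs ++ [v]).any id, (vs ++ [v]).head?, pvTailAllEq (vs ++ [v])) := by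
        cases h : PySem.Dict.get? (PySem.Dict.mk (pvCamsOf s)) cam with
        | none => simp [pvAltStep, h]
        | some v =>
            simp only [pvAltStep, h]
            cases vs with
            | nil => simp [pvTailAllEq]
            | cons v0 r =>
                simp only [List.length_cons, List.head?_cons, List.any_cons, List.cons_append,
                  pvTailAllEq, List.all_append, List.all_cons, List.all_nil, Prod.mk.injEq]
                refine ⟨by simp, by simp, ?_, by simp, ?_⟩
                · cases v <;> cases v0 <;> simp
                · by_cases hv : v = v0 <;> simp [hv, Bool.and_comm]
      rw [hstep]
      cases h : PySem.Dict.get? (PySem.Dict.mk (pvCamsOf s)) cam with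
      | none =>
          simp only [pvVals, List.filterMap_cons, h]
          rw [ih]
          simp [pvVals, Nat.add_assoc, Nat.add_comm 1 rest.length]
      | some v =>
          simp only [pvVals, List.filterMap_cons, h]
          rw [ih]
          simp [pvVals, Nat.add_assoc, Nat.add_comm 1 rest.length]

theorem pvAlt_char (ts : List (List (String × List (String × Bool)))) (cam : String) :
    cams_settings_requires_multi_edit_mode_py_alt ts cam
      = (if (pvVals ts cam).length = 0 then false
         else if (pvVals ts cam).length ≠ ts.length then (pvVals ts cam).any id
         else !(pvTailAllEq (pvVals ts cam))) := by
  simp only [cams_settings_requires_multi_edit_mode_py_alt]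
  rw [show ((0,0,false,none,true) : Nat × Nat × Bool × Option Bool × Bool)
        = (0, ([] : List Bool).length, ([] : List Bool).any id, ([] : List Bool).head?, pvTailAllEq []) from rfl]
  rw [pvAltStep_fold cam ts 0 []]
  simp only [List.nil_append, Nat.zero_add]

-- Bool == is symmetric (used to align A's first==each with B's each==first)
theorem pvBeqComm (a b : Bool) : (a == b) = (b == a) := by cases a <;> cases b <;> rfl

-- ===== VERDICT (by name: the statement is the Claim_ definition above) =====
theorem cams_settings_requires_multi_edit_mode_py_spec : Claim_equal_cams_settings_requires_multi_edit_mode_py := by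
  intro ts cam _hdom hpre
  unfold Spec_cams_settings_requires_multi_edit_mode_py
  rw [pvAlt_char]
  unfold cams_settings_requires_multi_edit_mode_py
  rw [PySem.List.foldl_append_if]
  rw [pvVals_eq_map_filter]
  simp only [List.nil_append, List.length_map, List.map_id']
  by_cases hnil : ts.filter (fun s => pvHasCam s cam) = []
  · simp [hnil]
  · have hne : ¬ (ts.filter (fun s => pvHasCam s cam)).length = 0 := by
      simp [List.length_eq_zero_iff, hnil]
    rw [if_neg (by simpa [List.isEmpty_iff] using hnil), if_neg hne]
    by_cases hlen : ts.length = (ts.filter (fun s => pvHasCam s cam)).length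
    · have hall : ∀ s ∈ ts, pvHasCam s cam = true := by
        have := (List.length_filter_eq_length_iff (l := ts) (p := fun s => pvHasCam s cam)).mp (by omega)
        simpa using this
      have hfe : ts.filter (fun s => pvHasCam s cam) = ts :=
        List.filter_eq_self.mpr (by simpa using hall)
      rw [hfe] at hne ⊢
      rw [if_neg (by omega), if_neg (by omega)]
      cases ts with
      | nil => simp at hne
      | cons t rest =>
          simp only [List.map_cons, pvTailAllEq, List.all_map, List.all_cons]
          have hget : ((PySem.List.pyGet? (t :: rest) (0 : Int)).getD []) = t := by
            simp [PySem.List.pyGet?, PySem.List.pyIdx?]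
          rw [hget]
          simp only [beq_self_eq_true, Bool.true_and]
          simp only [Function.comp_def]
          simp only [pvBeqComm (pvCamVal t cam)]
    · rw [if_pos (by omega), if_pos (by omega)]
      simp [List.any_map]
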